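-- pv_equiv track=rewrite | github.com/aakashdinkar/Hackerrank-Series | JimAndTheOrders.py | jimOrders
-- ===== SOURCE A (Python) =====
-- def jimOrders(orders):
--     dic = {}
--     i = 1
--     for item in orders:
--         if not sum(item) in dic:
--             dic[sum(item)] = [i]
--         else:
--             dic[sum(item)].append(i)
--         i += 1
--     res = []
--     for item in sorted(dic.keys()):
--         for char in dic[item]:
--             res.append(char)
--     return res
-- ===== SOURCE B (Python) =====
-- def jimOrders(orders):
--     times = [sum(item) for item in orders]
--     return sorted(range(1, len(orders) + 1), key=lambda i: times[i - 1])
-- ===== Notes on version B (the rewrite author's own statement) =====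
-- stated objective: simpler
-- what changed: A builds a dict grouping 1-based indices by finish time and then walks the sorted keys with a nested emit loop; B does a single stable sort of the indices 1..n keyed by precomputed finish times (stability gives the same within-tie order).
import Mathlib
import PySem

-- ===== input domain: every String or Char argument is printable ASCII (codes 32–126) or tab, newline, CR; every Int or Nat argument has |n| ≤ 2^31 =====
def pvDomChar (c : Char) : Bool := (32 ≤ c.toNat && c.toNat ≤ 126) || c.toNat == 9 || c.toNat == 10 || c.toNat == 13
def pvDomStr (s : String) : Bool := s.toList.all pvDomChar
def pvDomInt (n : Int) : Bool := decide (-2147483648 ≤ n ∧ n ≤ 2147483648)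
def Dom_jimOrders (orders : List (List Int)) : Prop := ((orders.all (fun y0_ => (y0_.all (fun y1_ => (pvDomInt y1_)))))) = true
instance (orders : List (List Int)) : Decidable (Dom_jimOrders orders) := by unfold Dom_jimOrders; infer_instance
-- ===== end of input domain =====

-- B replaces A's finish-time-keyed grouping dict plus nested emit loops with one stable sort of the
-- 1-based indices keyed by finish time (objective: simpler).

-- ===== PORT A =====
def jimOrders (orders : List (List Int)) : List Int :=
  let st := orders.foldl
    (fun (st : PySem.Dict Int (List Int) × Int) item =>
      if st.1.contains item.sum = false then (st.1.insert item.sum [st.2], st.2 + 1)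
      else (st.1.modify item.sum [] (fun l => l ++ [st.2]), st.2 + 1))
    (PySem.Dict.empty, 1)
  let dic := st.1
  -- `dic[item]` in the emit loop: the key comes from dic.keys, so it is always present; `getD _ []` is exact there
  (PySem.List.sorted dic.keys (fun x => x) false).foldl
    (fun res k => (dic.getD k []).foldl (fun r c => r ++ [c]) res) []

-- ===== PORT B =====
def jimOrders_alt (orders : List (List Int)) : List Int :=
  let times := orders.map (fun item => item.sum)
  PySem.List.sorted (PySem.List.pyRange 1 ((orders.length : Int) + 1))
    (fun i => PySem.List.pyGetD times (i - 1) 0) false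

-- ===== PRECONDITION & SPEC =====
def Spec_jimOrders (orders : List (List Int)) (out : List Int) : Prop := out = jimOrders_alt orders
instance (orders : List (List Int)) (out : List Int) : Decidable (Spec_jimOrders orders out) := by unfold Spec_jimOrders; infer_instance

-- ===== CLAIM (what is proved, stated in full; the proofs are below) =====
def Claim_equal_jimOrders : Prop := ∀ (orders : List (List Int)), Dom_jimOrders orders → Spec_jimOrders orders (jimOrders orders)

-- ===== LEMMAS AND PROOFS =====

lemma insertBy_append_pos (bef : Int → Int → Bool) (x : Int) (l₁ l₂ : List Int)
    (h₁ : ∀ b ∈ l₁, bef x b = false) (h₂ : ∀ b ∈ l₂, bef x b = true) :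
    PySem.List.insertBy bef x (l₁ ++ l₂) = l₁ ++ x :: l₂ := by
  induction l₁ with
  | nil =>
    cases l₂ with
    | nil => rfl
    | cons hd tl => simp [PySem.List.insertBy, h₂ hd (by simp)]
  | cons a t ih =>
    simp only [List.cons_append, PySem.List.insertBy, h₁ a (by simp)]
    simp only [Bool.false_eq_true, if_false]
    rw [ih (fun b hb => h₁ b (by simp [hb]))]

lemma dropWhile_le_gt (l : List Int) (k : Int) (h : l.Pairwise (· < ·)) :
    ∀ s ∈ l.dropWhile (fun s => decide (s ≤ k)), k < s := by
  induction l with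
  | nil => simp
  | cons a t ih =>
    rcases List.pairwise_cons.mp h with ⟨ha, ht⟩
    by_cases hak : a ≤ k
    · simpa [List.dropWhile_cons, hak] using ih ht
    · intro s hs
      rw [List.dropWhile_cons] at hs
      simp only [decide_eq_true_eq, hak, if_false] at hs
      rcases List.mem_cons.mp hs with rfl | hst
      · omega
      · exact lt_trans (by omega) (ha s hst)

lemma sorted_groups (xs : List Int) (key : Int → Int) :
    PySem.List.sorted xs key false
      = (PySem.List.sorted (PySem.Set.ofList (xs.map key)) (fun s => s) false).flatMap
          (fun s => xs.filter (fun x => key x == s)) := by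
  induction xs using List.reverseRecOn with
  | nil => rfl
  | append_singleton xs x ih =>
    set k := key x with hkdef
    set S := PySem.List.sorted (PySem.Set.ofList (xs.map key)) (fun s => s) false with hSdef
    have hSpair : S.Pairwise (· < ·) := PySem.List.sorted_ofList_pairwise_lt _
    have hSmem : ∀ s, s ∈ S ↔ s ∈ xs.map key := by
      intro s; rw [hSdef, PySem.List.mem_sorted, PySem.Set.mem_ofList]
    -- the new element is inserted into the stable sort of the prefix
    have hL : PySem.List.sorted (xs ++ [x]) key false
        = PySem.List.insertBy (fun a b => decide (key a < key b)) x (PySem.List.sorted xs key false) := by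
      rw [PySem.List.sorted_eq_foldl_insertBy, PySem.List.sorted_eq_foldl_insertBy, List.foldl_append]
      rfl
    have hset : PySem.Set.ofList ((xs ++ [x]).map key)
        = PySem.Set.add (PySem.Set.ofList (xs.map key)) k := by
      rw [List.map_append, List.map_singleton, PySem.Set.ofList_eq_foldl, List.foldl_append,
        ← PySem.Set.ofList_eq_foldl]
      rfl
    have hgrp' : ∀ s, ((xs ++ [x]).filter (fun y => key y == s))
        = xs.filter (fun y => key y == s) ++ (if k == s then [x] else []) := by
      intro s
      rw [List.filter_append]
      congr 1
      simp [List.filter_cons, hkdef]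
    have hgrp'_ne : ∀ s, s ≠ k → ((xs ++ [x]).filter (fun y => key y == s))
        = xs.filter (fun y => key y == s) := by
      intro s hs
      rw [hgrp' s]
      simp [Ne.symm hs]
    have hgrpkey : ∀ s b, b ∈ xs.filter (fun y => key y == s) → key b = s := by
      intro s b hb
      have := (List.mem_filter.mp hb).2
      exact beq_iff_eq.mp this
    rw [hL, ih]
    by_cases hk : k ∈ xs.map key
    · -- existing key: S unchanged, x goes to the end of its group
      have hS' : PySem.List.sorted (PySem.Set.ofList ((xs ++ [x]).map key)) (fun s => s) false = S := by
        rw [hset, PySem.Set.add_of_mem (by rwa [PySem.Set.mem_ofList])]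
      rw [hS']
      obtain ⟨P, Q, hPQ⟩ := List.append_of_mem ((hSmem k).mpr hk)
      have hpair' := hPQ ▸ hSpair
      have hP : ∀ p ∈ P, p < k := by
        intro p hp
        exact (List.pairwise_append.mp hpair').2.2 p hp k (by simp)
      have hQ : ∀ q ∈ Q, k < q := by
        intro q hq
        exact (List.pairwise_cons.mp (List.pairwise_append.mp hpair').2.1).1 q hq
      rw [hPQ]
      rw [List.flatMap_append, List.flatMap_cons, List.flatMap_append, List.flatMap_cons]
      have e1 : P.flatMap (fun s => (xs ++ [x]).filter (fun y => key y == s))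
          = P.flatMap (fun s => xs.filter (fun y => key y == s)) :=
        List.flatMap_congr (fun s hs => hgrp'_ne s (by have := hP s hs; omega))
      have e2 : Q.flatMap (fun s => (xs ++ [x]).filter (fun y => key y == s))
          = Q.flatMap (fun s => xs.filter (fun y => key y == s)) :=
        List.flatMap_congr (fun s hs => hgrp'_ne s (by have := hQ s hs; omega))
      rw [e1, e2, hgrp' k, if_pos (by simp)]
      rw [show P.flatMap (fun s => xs.filter (fun y => key y == s)) ++
            (xs.filter (fun y => key y == k) ++
              Q.flatMap (fun s => xs.filter (fun y => key y == s)))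
          = (P.flatMap (fun s => xs.filter (fun y => key y == s)) ++
              xs.filter (fun y => key y == k)) ++
              Q.flatMap (fun s => xs.filter (fun y => key y == s)) from by simp]
      rw [insertBy_append_pos]
      · simp
      · intro b hb
        rcases List.mem_append.mp hb with hb | hb
        · rcases List.mem_flatMap.mp hb with ⟨s, hsP, hbs⟩
          have := hgrpkey s b hbs
          have := hP s hsP
          simp only [decide_eq_false_iff_not]
          omega
        · have := hgrpkey k b hb
          simp only [decide_eq_false_iff_not]
          omega
      · intro b hb
        rcases List.mem_flatMap.mp hb with ⟨s, hsQ, hbs⟩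
        have := hgrpkey s b hbs
        have := hQ s hsQ
        simp only [decide_eq_true_eq]
        omega
    · -- new key: it lands between the smaller and the larger keys, alone in its group
      set L := S.takeWhile (fun s => decide (s ≤ k)) with hLdef
      set R := S.dropWhile (fun s => decide (s ≤ k)) with hRdef
      have hLR : L ++ R = S := List.takeWhile_append_dropWhile
      have hPL : ∀ p ∈ L, p < k := by
        intro p hp
        have h1 : p ≤ k := by simpa using List.mem_takeWhile_imp hp
        have h2 : p ∈ S := (List.takeWhile_sublist _).mem hp
        have h3 : p ≠ k := by
          intro h; exact hk (h ▸ (hSmem p).mp h2)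
        omega
      have hQR : ∀ q ∈ R, k < q := dropWhile_le_gt S k hSpair
      have hS' : PySem.List.sorted (PySem.Set.ofList ((xs ++ [x]).map key)) (fun s => s) false
          = L ++ k :: R := by
        rw [hset, PySem.Set.add_of_not_mem (by rw [PySem.Set.mem_ofList]; exact hk)]
        apply PySem.List.sorted_eq_of_perm_of_pairwise_lt
        · have p1 : (L ++ k :: R).Perm (k :: S) := by
            have := List.perm_middle (a := k) (l₁ := L) (l₂ := R)
            rwa [hLR] at this
          have p2 : (k :: S).Perm (k :: PySem.Set.ofList (xs.map key)) :=
            (PySem.List.sorted_perm _ _ _).cons k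
          exact (p1.trans p2).trans (List.perm_append_singleton k _).symm
        · rw [List.pairwise_append]
          refine ⟨hSpair.sublist (List.takeWhile_sublist _), ?_, ?_⟩
          · exact List.pairwise_cons.mpr ⟨hQR, hSpair.sublist (List.dropWhile_sublist _)⟩
          · intro p hp b hb
            rcases List.mem_cons.mp hb with rfl | hbR
            · exact hPL p hp
            · exact lt_trans (hPL p hp) (hQR b hbR)
      rw [hS']
      have hgrpk : xs.filter (fun y => key y == k) = [] := by
        rw [List.filter_eq_nil_iff]
        intro y hy hyk
        exact hk (List.mem_map.mpr ⟨y, hy, beq_iff_eq.mp hyk⟩)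
      rw [List.flatMap_append, List.flatMap_cons]
      have e1 : L.flatMap (fun s => (xs ++ [x]).filter (fun y => key y == s))
          = L.flatMap (fun s => xs.filter (fun y => key y == s)) :=
        List.flatMap_congr (fun s hs => hgrp'_ne s (by have := hPL s hs; omega))
      have e2 : R.flatMap (fun s => (xs ++ [x]).filter (fun y => key y == s))
          = R.flatMap (fun s => xs.filter (fun y => key y == s)) :=
        List.flatMap_congr (fun s hs => hgrp'_ne s (by have := hQR s hs; omega))
      rw [e1, e2, hgrp' k, if_pos (by simp), hgrpk]
      rw [← hLR, List.flatMap_append]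
      rw [insertBy_append_pos]
      · simp
      · intro b hb
        rcases List.mem_flatMap.mp hb with ⟨s, hsL, hbs⟩
        have := hgrpkey s b hbs
        have := hPL s hsL
        simp only [decide_eq_false_iff_not]
        omega
      · intro b hb
        rcases List.mem_flatMap.mp hb with ⟨s, hsR, hbs⟩
        have := hgrpkey s b hbs
        have := hQR s hsR
        simp only [decide_eq_true_eq]
        omega

lemma loopA (orders : List (List Int)) (dic : PySem.Dict Int (List Int)) (i : Int) :
    orders.foldl
      (fun (st : PySem.Dict Int (List Int) × Int) item =>
        if st.1.contains item.sum = false then (st.1.insert item.sum [st.2], st.2 + 1)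
        else (st.1.modify item.sum [] (fun l => l ++ [st.2]), st.2 + 1))
      (dic, i)
    = (((PySem.List.enumerate orders i).map (fun p => (p.2.sum, p.1))).foldl
         (fun d q => d.modify q.1 [] (fun l => l ++ [q.2])) dic,
       i + orders.length) := by
  induction orders generalizing dic i with
  | nil => simp [PySem.List.enumerate]
  | cons item rest ih =>
    rw [List.foldl_cons, PySem.List.enumerate_cons]
    have hstep : (if dic.contains item.sum = false then (dic.insert item.sum [i], i + 1)
        else (dic.modify item.sum [] (fun l => l ++ [i]), i + 1))
        = (dic.modify item.sum [] (fun l => l ++ [i]), i + 1) := by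
      by_cases h : dic.contains item.sum = false
      · simp [h, PySem.Dict.modify, PySem.Dict.getD_of_not_contains dic [] h]
      · simp [h]
    rw [hstep, ih]
    simp only [List.map_cons, List.foldl_cons, List.length_cons, Prod.mk.injEq]
    exact ⟨trivial, by push_cast; ring⟩

lemma enum_filter_map (orders : List (List Int)) (i : Int) (s : Int) :
    ((PySem.List.enumerate orders i).filter (fun p => p.2.sum == s)).map (·.1)
      = ((List.range orders.length).filter (fun k => (orders.getD k []).sum == s)).map
          (fun (k : Nat) => i + (k : Int)) := by
  induction orders generalizing i with
  | nil => simp [PySem.List.enumerate]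
  | cons o rest ih =>
    by_cases h : o.sum == s <;>
    · simp [PySem.List.enumerate_cons, List.range_succ_eq_map, h, List.filter_map, ih (i+1),
        Function.comp_def, Nat.succ_eq_add_one, List.map_map]
      intros; ring

lemma map_getD_range_self (ts : List Int) :
    (List.range ts.length).map (fun k => ts.getD k 0) = ts := by
  apply List.ext_getElem
  · simp
  · intro i h1 h2
    simp [List.getD_eq_getElem?_getD, List.getElem?_eq_getElem h2]

-- A's output in canonical form
lemma jimOrders_eq (orders : List (List Int)) :
    jimOrders orders
      = (PySem.List.sorted (PySem.Set.ofList (orders.map (fun item => item.sum))) (fun s => s) false).flatMap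
          (fun s => ((List.range orders.length).filter (fun k => (orders.getD k []).sum == s)).map
            (fun (k : Nat) => 1 + (k : Int))) := by
  simp only [jimOrders]
  rw [loopA]
  set pairs := (PySem.List.enumerate orders 1).map (fun p => (p.2.sum, p.1)) with hpairs
  have hkeys : (pairs.foldl (fun d q => d.modify q.1 [] (fun l => l ++ [q.2]))
        (PySem.Dict.empty : PySem.Dict Int (List Int))).keys
      = PySem.Set.ofList (orders.map (fun item => item.sum)) := by
    rw [PySem.Dict.keys_foldl_modify_key pairs Prod.fst [] (fun _ q v => v ++ [q.2]) PySem.Dict.empty]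
    have : pairs.map Prod.fst = orders.map (fun item => item.sum) := by
      rw [hpairs, List.map_map]
      have h2 : ((PySem.List.enumerate orders 1).map (·.2)).map (fun item => item.sum)
          = orders.map (fun item => item.sum) := by
        rw [PySem.List.map_snd_enumerate]
      rw [← h2, List.map_map]
      rfl
    rw [this]
    rfl
  have hgetD : ∀ c, (pairs.foldl (fun d q => d.modify q.1 [] (fun l => l ++ [q.2]))
        (PySem.Dict.empty : PySem.Dict Int (List Int))).getD c []
      = ((List.range orders.length).filter (fun k => (orders.getD k []).sum == c)).map
          (fun (k : Nat) => 1 + (k : Int)) := by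
    intro c
    rw [PySem.Dict.getD_foldl_modify_append pairs PySem.Dict.empty c]
    have : (pairs.filter (fun p => p.1 == c)).map (fun x => x.2)
        = ((PySem.List.enumerate orders 1).filter (fun p => p.2.sum == c)).map (·.1) := by
      rw [hpairs, List.filter_map, List.map_map]
      rfl
    rw [this, enum_filter_map]
    rfl
  rw [hkeys]
  have hloop : ∀ (S : List Int) (acc : List Int),
      S.foldl (fun res k =>
        ((pairs.foldl (fun d q => d.modify q.1 [] (fun l => l ++ [q.2]))
          (PySem.Dict.empty : PySem.Dict Int (List Int))).getD k []).foldl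
            (fun r c => r ++ [c]) res) acc
      = acc ++ S.flatMap (fun s =>
          ((List.range orders.length).filter (fun k => (orders.getD k []).sum == s)).map
            (fun (k : Nat) => 1 + (k : Int))) := by
    intro S acc
    rw [PySem.List.foldl_congr_mem S _
      (fun res k => res ++ ((List.range orders.length).filter
        (fun kk => (orders.getD kk []).sum == k)).map (fun (kk : Nat) => 1 + (kk : Int))) acc
      (by intro acc' k _
          rw [PySem.List.foldl_append_singleton_eq_self, hgetD k])]
    rw [PySem.List.foldl_append_eq_flatMap]
  rw [hloop]
  rfl

-- B's output in the same canonical form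
lemma jimOrders_alt_eq (orders : List (List Int)) :
    jimOrders_alt orders
      = (PySem.List.sorted (PySem.Set.ofList (orders.map (fun item => item.sum))) (fun s => s) false).flatMap
          (fun s => ((List.range orders.length).filter (fun k => (orders.getD k []).sum == s)).map
            (fun (k : Nat) => 1 + (k : Int))) := by
  unfold jimOrders_alt
  set times := orders.map (fun item => item.sum) with htimes
  have hlen : times.length = orders.length := by rw [htimes, List.length_map]
  have hrange : PySem.List.pyRange 1 ((orders.length : Int) + 1)
      = (List.range orders.length).map (fun (k : Nat) => 1 + (k : Int)) := by
    rw [PySem.List.pyRange_one,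
      show ((orders.length : Int) + 1 - 1).toNat = orders.length by omega]
  have hkey : ∀ k : Nat, k < orders.length →
      PySem.List.pyGetD times ((1 + (k : Int)) - 1) 0 = (orders.getD k []).sum := by
    intro k hk
    rw [show (1 : Int) + (k : Int) - 1 = (k : Int) by ring, PySem.List.pyGetD_natCast]
    rw [List.getD_eq_getElem _ _ (by omega), List.getD_eq_getElem _ _ hk]
    simp [htimes]
  rw [hrange, sorted_groups]
  have hmapkey : ((List.range orders.length).map (fun (k : Nat) => 1 + (k : Int))).map
        (fun i => PySem.List.pyGetD times (i - 1) 0) = times := by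
    rw [List.map_map]
    have : ∀ k ∈ List.range orders.length,
        ((fun i => PySem.List.pyGetD times (i - 1) 0) ∘ (fun (k : Nat) => 1 + (k : Int))) k
          = times.getD k 0 := by
      intro k hk
      show PySem.List.pyGetD times ((1 + (k : Int)) - 1) 0 = times.getD k 0
      rw [show (1 : Int) + (k : Int) - 1 = (k : Int) by ring, PySem.List.pyGetD_natCast]
    rw [List.map_congr_left this, ← hlen, map_getD_range_self]
  rw [hmapkey]
  apply List.flatMap_congr
  intro s _
  rw [List.filter_map]
  have : ∀ k ∈ List.range orders.length,
      ((fun i => PySem.List.pyGetD times (i - 1) 0 == s) ∘ (fun (k : Nat) => 1 + (k : Int))) k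
        = ((orders.getD k []).sum == s) := by
    intro k hk
    have hk' : k < orders.length := List.mem_range.mp hk
    show (PySem.List.pyGetD times ((1 + (k : Int)) - 1) 0 == s) = _
    rw [hkey k hk']
  rw [List.filter_congr this]

-- ===== VERDICT (by name: the statement is the Claim_ definition above) =====
theorem jimOrders_spec : Claim_equal_jimOrders := by
  intro orders _
  unfold Spec_jimOrders
  rw [jimOrders_eq, jimOrders_alt_eq]
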